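-- pv_equiv track=rewrite | github.com/woniuhuli/LeetCode_practice | LeetCode.py | solve
-- ===== SOURCE A (Python) =====
-- def  solve(S, T):
--     def compair(s1,s2):
--         dict1 = {}
--         dict2 = {}
--         for i in range(len(s1)):
--             if s1[i] in dict1:
--                 if dict1[s1[i]] != s2[i]:
--                     return False
--             else:
--                 dict1[s1[i]] = s2[i]
--             if s2[i] in dict2:
--                 if dict2[s2[i]] != s1[i]:
--                     return False
--             else:
--                 dict2[s2[i]] = s1[i]
--         return True
--     ans = 0
--     l1 = len(T)
--     for i in range(len(S)-l1+1):
--         if compair(S[i:i+l1],T):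
--             ans += 1
--     return ans
-- ===== SOURCE B (Python) =====
-- def solve(S, T):
--     # Normalize a string to its first-occurrence-index fingerprint:
--     # two strings are isomorphic (bijectively) iff their fingerprints match.
--     def norm(s):
--         first = {}
--         out = []
--         for i, c in enumerate(s):
--             if c not in first:
--                 first[c] = i
--             out.append(first[c])
--         return out
--     m = len(T)
--     pat = norm(T)
--     ans = 0
--     for i in range(len(S) - m + 1):
--         if norm(S[i:i+m]) == pat:
--             ans += 1
--     return ans
-- ===== Notes on version B (the rewrite author's own statement) =====
-- stated objective: alternative
-- what changed: The per-window two-dictionary bidirectional-mapping consistency check is replaced by comparing first-occurrence-index fingerprints: T's fingerprint is computed once and each window's single-pass fingerprint is compared to it.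
import Mathlib
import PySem

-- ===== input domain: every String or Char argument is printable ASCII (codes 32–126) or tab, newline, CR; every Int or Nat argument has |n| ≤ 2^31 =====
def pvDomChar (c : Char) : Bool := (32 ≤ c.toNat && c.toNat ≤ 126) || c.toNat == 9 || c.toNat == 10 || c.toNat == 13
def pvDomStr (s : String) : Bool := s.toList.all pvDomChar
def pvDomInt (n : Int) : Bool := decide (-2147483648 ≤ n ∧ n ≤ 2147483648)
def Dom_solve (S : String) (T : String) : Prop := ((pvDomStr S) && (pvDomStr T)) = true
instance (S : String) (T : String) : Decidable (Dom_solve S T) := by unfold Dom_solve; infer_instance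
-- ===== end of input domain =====

-- B replaces A's per-window two-dictionary bidirectional-mapping check by comparing
-- first-occurrence-index fingerprints against T's fingerprint computed once (objective: alternative).

-- ===== PORT A =====
-- loop body of compair: the two dicts map chars of s1 to chars of s2 and back; early return = false
def compairGo (l : List (Char × Char)) (d1 d2 : PySem.Dict Char Char) : Bool :=
  match l with
  | [] => true
  | (a, b) :: rest =>
    match d1.get? a with
    | some v =>
      if v ≠ b then false
      else
        match d2.get? b with
        | some u => if u ≠ a then false else compairGo rest d1 d2
        | none => compairGo rest d1 (d2.insert b a)
    | none =>
      match d2.get? b with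
      | some u => if u ≠ a then false else compairGo rest (d1.insert a b) d2
      | none => compairGo rest (d1.insert a b) (d2.insert b a)

-- compair iterates i over range(len(s1)) reading s1[i], s2[i]; solve only calls it with
-- len(s1) = len(s2), so the index loop is the zip of the two lists
def compair (s1 s2 : List Char) : Bool :=
  compairGo (s1.zip s2) PySem.Dict.empty PySem.Dict.empty

def solve (S : String) (T : String) : Int :=
  let s := S.toList
  let t := T.toList
  let l1 : Int := t.length
  (PySem.List.pyRange 0 ((s.length : Int) - l1 + 1) 1).foldl
    (fun ans i => if compair (PySem.List.slice s (some i) (some (i + l1))) t then ans + 1 else ans) 0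

-- ===== PORT B =====
-- normB's loop: `first` maps a char to its first index; the output appends first[c] for each c
def normGo (cs : List Char) (i : Int) (first : PySem.Dict Char Int) : List Int :=
  match cs with
  | [] => []
  | c :: rest =>
    match first.get? c with
    | some j => j :: normGo rest (i + 1) first
    | none => i :: normGo rest (i + 1) (first.insert c i)

def normB (s : List Char) : List Int := normGo s 0 PySem.Dict.empty

def solve_alt (S : String) (T : String) : Int :=
  let s := S.toList
  let t := T.toList
  let m : Int := t.length
  let pat := normB t
  (PySem.List.pyRange 0 ((s.length : Int) - m + 1) 1).foldl
    (fun ans i => if normB (PySem.List.slice s (some i) (some (i + m))) = pat then ans + 1 else ans) 0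

-- ===== PRECONDITION & SPEC =====
def Spec_solve (S : String) (T : String) (out : Int) : Prop := out = solve_alt S T
instance (S : String) (T : String) (out : Int) : Decidable (Spec_solve S T out) := by unfold Spec_solve; infer_instance

-- ===== CLAIM (what is proved, stated in full; the proofs are below) =====
def Claim_equal_solve : Prop := ∀ (S : String) (T : String), Dom_solve S T → Spec_solve S T (solve S T)

-- ===== LEMMAS AND PROOFS =====

-- the pairwise characterisation both per-window tests are reduced to
def Iso (l : List (Char × Char)) : Prop := ∀ p ∈ l, ∀ q ∈ l, (p.1 = q.1 ↔ p.2 = q.2)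

theorem Iso_nil : Iso [] := by intro p hp; simp at hp

theorem Iso_append_singleton {q : List (Char × Char)} {x : Char × Char} :
    Iso (q ++ [x]) ↔ Iso q ∧ ∀ p ∈ q, (p.1 = x.1 ↔ p.2 = x.2) := by
  constructor
  · intro h
    exact ⟨fun p hp r hr => h p (by simp [hp]) r (by simp [hr]),
           fun p hp => h p (by simp [hp]) x (by simp)⟩
  · rintro ⟨h1, h2⟩ p hp r hr
    simp only [List.mem_append, List.mem_singleton] at hp hr
    rcases hp with hp | hp <;> rcases hr with hr | hr
    · exact h1 p hp r hr
    · subst hr; exact h2 p hp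
    · subst hp
      exact ⟨fun h => ((h2 r hr).mp h.symm).symm, fun h => ((h2 r hr).mpr h.symm).symm⟩
    · subst hp; subst hr; simp
  -- A-side: invariant transfer for the two dicts
theorem h1_keep {q : List (Char × Char)} {a b : Char} {d1 : PySem.Dict Char Char}
    (h1 : ∀ a', d1.get? a' = (List.find? (fun p => p.1 == a') q).map Prod.snd)
    {y : Char × Char} (hs : List.find? (fun p => p.1 == a) q = some y) :
    ∀ a', d1.get? a' = (List.find? (fun p => p.1 == a') (q ++ [(a, b)])).map Prod.snd := by
  intro a'
  rw [h1 a', List.find?_append]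
  rcases hf : List.find? (fun p => p.1 == a') q with _ | w
  · have hne : a ≠ a' := by
      intro h; subst h; rw [hf] at hs; simp at hs
    have hb : (a == a') = false := beq_eq_false_iff_ne.mpr hne
    rw [hf]
    simp [List.find?, hb, Option.or]
  · rw [hf]
    simp [Option.or]

theorem h1_insert {q : List (Char × Char)} {a b : Char} {d1 : PySem.Dict Char Char}
    (h1 : ∀ a', d1.get? a' = (List.find? (fun p => p.1 == a') q).map Prod.snd)
    (hn : List.find? (fun p => p.1 == a) q = none) :
    ∀ a', (d1.insert a b).get? a' = (List.find? (fun p => p.1 == a') (q ++ [(a, b)])).map Prod.snd := by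
  intro a'
  rw [PySem.Dict.get?_insert, List.find?_append]
  by_cases he : a' = a
  · subst he; rw [if_pos rfl, hn]; simp [List.find?, Option.or]
  · rw [if_neg he, h1 a']
    have hb : (a == a') = false := beq_eq_false_iff_ne.mpr (Ne.symm he)
    rcases hf : List.find? (fun p => p.1 == a') q with _ | w <;>
      · rw [hf]; simp [List.find?, hb, Option.or]

theorem h2_keep {q : List (Char × Char)} {a b : Char} {d2 : PySem.Dict Char Char}
    (h2 : ∀ b', d2.get? b' = (List.find? (fun p => p.2 == b') q).map Prod.fst)
    {z : Char × Char} (hs : List.find? (fun p => p.2 == b) q = some z) :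
    ∀ b', d2.get? b' = (List.find? (fun p => p.2 == b') (q ++ [(a, b)])).map Prod.fst := by
  intro b'
  rw [h2 b', List.find?_append]
  rcases hf : List.find? (fun p => p.2 == b') q with _ | w
  · have hne : b ≠ b' := by
      intro h; subst h; rw [hf] at hs; simp at hs
    have hb : (b == b') = false := beq_eq_false_iff_ne.mpr hne
    rw [hf]
    simp [List.find?, hb, Option.or]
  · rw [hf]
    simp [Option.or]

theorem h2_insert {q : List (Char × Char)} {a b : Char} {d2 : PySem.Dict Char Char}
    (h2 : ∀ b', d2.get? b' = (List.find? (fun p => p.2 == b') q).map Prod.fst)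
    (hn : List.find? (fun p => p.2 == b) q = none) :
    ∀ b', (d2.insert b a).get? b' = (List.find? (fun p => p.2 == b') (q ++ [(a, b)])).map Prod.fst := by
  intro b'
  rw [PySem.Dict.get?_insert, List.find?_append]
  by_cases he : b' = b
  · subst he; rw [if_pos rfl, hn]; simp [List.find?, Option.or]
  · rw [if_neg he, h2 b']
    have hb : (b == b') = false := beq_eq_false_iff_ne.mpr (Ne.symm he)
    rcases hf : List.find? (fun p => p.2 == b') q with _ | w <;>
      · rw [hf]; simp [List.find?, hb, Option.or]

-- extending Iso by one compatible pair
theorem iso_extend {q : List (Char × Char)} {a b : Char} (hq : Iso q)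
    (hA : ∀ p ∈ q, p.1 = a → p.2 = b) (hB : ∀ p ∈ q, p.2 = b → p.1 = a) :
    Iso (q ++ [(a, b)]) :=
  Iso_append_singleton.mpr ⟨hq, fun p hp => ⟨hA p hp, hB p hp⟩⟩

-- a pair of q incompatible with (a,b) refutes Iso (q ++ (a,b)::rest)
theorem not_iso_of_bad {q rest : List (Char × Char)} {a b : Char} {w : Char × Char}
    (hw : w ∈ q) (hbad : ¬ (w.1 = a ↔ w.2 = b)) : ¬ Iso (q ++ (a, b) :: rest) := by
  intro h
  exact hbad (h w (by simp [hw]) (a, b) (by simp))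

theorem compairGo_iff (l : List (Char × Char)) :
    ∀ (q : List (Char × Char)) (d1 d2 : PySem.Dict Char Char),
      (∀ a', d1.get? a' = (List.find? (fun p => p.1 == a') q).map Prod.snd) →
      (∀ b', d2.get? b' = (List.find? (fun p => p.2 == b') q).map Prod.fst) →
      Iso q → (compairGo l d1 d2 = true ↔ Iso (q ++ l)) := by
  induction l with
  | nil =>
    intro q d1 d2 _ _ hq
    simp [compairGo, hq]
  | cons hd rest ih =>
    rcases hd with ⟨a, b⟩
    intro q d1 d2 h1 h2 hq
    have happ : (q ++ [(a, b)]) ++ rest = q ++ (a, b) :: rest := by simp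
    rcases hfind : List.find? (fun p => p.1 == a) q with _ | y
    · -- a unseen in q's first components
      have hga : d1.get? a = none := by rw [h1 a, hfind]; rfl
      have hAnone : ∀ p ∈ q, p.1 = a → p.2 = b := by
        intro p hp hpa
        exact absurd (by simp [hpa] : (fun p : Char × Char => p.1 == a) p = true)
          (List.find?_eq_none.mp hfind p hp)
      rcases gfind : List.find? (fun p => p.2 == b) q with _ | z
      · have hgb : d2.get? b = none := by rw [h2 b, gfind]; rfl
        have hBnone : ∀ p ∈ q, p.2 = b → p.1 = a := by
          intro p hp hpb
          exact absurd (by simp [hpb] : (fun p : Char × Char => p.2 == b) p = true)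
            (List.find?_eq_none.mp gfind p hp)
        have hiso' : Iso (q ++ [(a, b)]) := iso_extend hq hAnone hBnone
        have := ih (q ++ [(a, b)]) (d1.insert a b) (d2.insert b a)
          (h1_insert h1 hfind) (h2_insert h2 gfind) hiso'
        rw [happ] at this
        simpa [compairGo, hga, hgb] using this
      · -- b seen first at z
        have hz1 : z ∈ q := List.mem_of_find?_eq_some gfind
        have hz2 : z.2 = b := by simpa using List.find?_some gfind
        have hgb : d2.get? b = some z.1 := by rw [h2 b, gfind]; rfl
        by_cases hza : z.1 = a
        · have hB : ∀ p ∈ q, p.2 = b → p.1 = a := by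
            intro p hp hpb
            exact ((hq p hp z hz1).mpr (by rw [hz2, hpb])).trans hza
          have hiso' : Iso (q ++ [(a, b)]) := iso_extend hq hAnone hB
          have := ih (q ++ [(a, b)]) (d1.insert a b) d2
            (h1_insert h1 hfind) (h2_keep h2 gfind) hiso'
          rw [happ] at this
          simpa [compairGo, hga, hgb, hza] using this
        · have hbad : ¬ Iso (q ++ (a, b) :: rest) :=
            not_iso_of_bad hz1 (by simp [hz2, hza])
          simp [compairGo, hga, hgb, hza, hbad]
    · -- a seen first at y
      have hy1 : y ∈ q := List.mem_of_find?_eq_some hfind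
      have hy2 : y.1 = a := by simpa using List.find?_some hfind
      have hga : d1.get? a = some y.2 := by rw [h1 a, hfind]; rfl
      by_cases hyb : y.2 = b
      · have hA : ∀ p ∈ q, p.1 = a → p.2 = b := by
          intro p hp hpa
          exact ((hq p hp y hy1).mp (by rw [hy2, hpa])).trans hyb
        rcases gfind : List.find? (fun p => p.2 == b) q with _ | z
        · have hgb : d2.get? b = none := by rw [h2 b, gfind]; rfl
          have hBnone : ∀ p ∈ q, p.2 = b → p.1 = a := by
            intro p hp hpb
            exact absurd (by simp [hpb] : (fun p : Char × Char => p.2 == b) p = true)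
              (List.find?_eq_none.mp gfind p hp)
          have hiso' : Iso (q ++ [(a, b)]) := iso_extend hq hA hBnone
          have := ih (q ++ [(a, b)]) d1 (d2.insert b a)
            (h1_keep h1 hfind) (h2_insert h2 gfind) hiso'
          rw [happ] at this
          simpa [compairGo, hga, hgb, hyb] using this
        · have hz1 : z ∈ q := List.mem_of_find?_eq_some gfind
          have hz2 : z.2 = b := by simpa using List.find?_some gfind
          have hgb : d2.get? b = some z.1 := by rw [h2 b, gfind]; rfl
          by_cases hza : z.1 = a
          · have hB : ∀ p ∈ q, p.2 = b → p.1 = a := by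
              intro p hp hpb
              exact ((hq p hp z hz1).mpr (by rw [hz2, hpb])).trans hza
            have hiso' : Iso (q ++ [(a, b)]) := iso_extend hq hA hB
            have := ih (q ++ [(a, b)]) d1 d2 (h1_keep h1 hfind) (h2_keep h2 gfind) hiso'
            rw [happ] at this
            simpa [compairGo, hga, hgb, hyb, hza] using this
          · have hbad : ¬ Iso (q ++ (a, b) :: rest) :=
              not_iso_of_bad hz1 (by simp [hz2, hza])
            simp [compairGo, hga, hgb, hyb, hza, hbad]
      · have hbad : ¬ Iso (q ++ (a, b) :: rest) :=
          not_iso_of_bad hy1 (by simp [hy2, hyb])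
        simp [compairGo, hga, hyb, hbad]

theorem compair_iff_iso (s1 s2 : List Char) :
    (compair s1 s2 = true) ↔ Iso (s1.zip s2) := by
  have := compairGo_iff (s1.zip s2) [] PySem.Dict.empty PySem.Dict.empty
    (fun a' => by simp [PySem.Dict.get?_empty])
    (fun b' => by simp [PySem.Dict.get?_empty])
    Iso_nil
  simpa [compair] using this

-- B-side: normGo computes first-occurrence indices
theorem normGo_spec (cs : List Char) :
    ∀ (p : List Char) (first : PySem.Dict Char Int),
      (∀ c, first.get? c = if c ∈ p then some ((List.idxOf c p : Nat) : Int) else none) →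
      normGo cs (p.length : Int) first
        = cs.map (fun c => ((List.idxOf c (p ++ cs) : Nat) : Int)) := by
  induction cs with
  | nil => intro p first _; simp [normGo]
  | cons c rest ih =>
    intro p first h
    have happ : (p ++ [c]) ++ rest = p ++ c :: rest := by simp
    by_cases hc : c ∈ p
    · have hg : first.get? c = some ((List.idxOf c p : Nat) : Int) := by rw [h c, if_pos hc]
      have hinv : ∀ c', first.get? c' =
          if c' ∈ p ++ [c] then some ((List.idxOf c' (p ++ [c]) : Nat) : Int) else none := by
        intro c'
        rw [h c']
        by_cases hc' : c' ∈ p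
        · rw [if_pos hc', if_pos (by simp [hc']), List.idxOf_append, if_pos hc']
        · by_cases hcc : c' = c
          · exact absurd (hcc ▸ hc) hc'
          · rw [if_neg hc', if_neg (by simp [hc', hcc])]
      have hlen : (p.length : Int) + 1 = ((p ++ [c]).length : Int) := by simp
      have := ih (p ++ [c]) first hinv
      rw [happ] at this
      simp only [normGo, hg, hlen, this]
      rw [List.map_cons, List.idxOf_append, if_pos hc]
    · have hg : first.get? c = none := by rw [h c, if_neg hc]
      have hinv : ∀ c', (first.insert c (p.length : Int)).get? c' =
          if c' ∈ p ++ [c] then some ((List.idxOf c' (p ++ [c]) : Nat) : Int) else none := by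
        intro c'
        rw [PySem.Dict.get?_insert]
        by_cases hcc : c' = c
        · subst hcc
          rw [if_pos rfl, if_pos (by simp), List.idxOf_append, if_neg hc,
            List.idxOf_cons_self]
          simp
        · rw [if_neg hcc, h c']
          by_cases hc' : c' ∈ p
          · rw [if_pos hc', if_pos (by simp [hc']), List.idxOf_append, if_pos hc']
          · rw [if_neg hc', if_neg (by simp [hc', hcc])]
      have hlen : (p.length : Int) + 1 = ((p ++ [c]).length : Int) := by simp
      have := ih (p ++ [c]) (first.insert c (p.length : Int)) hinv
      rw [happ] at this
      simp only [normGo, hg, hlen, this]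
      rw [List.map_cons, List.idxOf_append, if_neg hc, List.idxOf_cons_self]
      simp

theorem norm_eq (s : List Char) :
    normB s = s.map (fun c => ((List.idxOf c s : Nat) : Int)) := by
  have := normGo_spec s [] PySem.Dict.empty
    (fun c => by simp [PySem.Dict.get?_empty])
  unfold normB
  simpa using this

theorem idxOf_le_of_getElem (s : List Char) (i : Nat) (hi : i < s.length) :
    List.idxOf s[i] s ≤ i := by
  induction s generalizing i with
  | nil => simp at hi
  | cons x xs ih =>
    cases i with
    | zero => simp [List.idxOf_cons_self]
    | succ n =>
      have hn : n < xs.length := by simpa using hi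
      have hrec := ih n hn
      simp only [List.getElem_cons_succ]
      rw [List.idxOf_cons]
      cases hx : x == xs[n]
      · simp only [cond_false]
        omega
      · simp

-- u[i] = u[j] transfers to v[i] = v[j] when the two fingerprints agree pointwise
theorem half_transfer (u v : List Char)
    (h : ∀ i (hiu : i < u.length) (hiv : i < v.length), List.idxOf u[i] u = List.idxOf v[i] v)
    (i j : Nat) (hi : i < u.length) (hj : j < u.length)
    (hi' : i < v.length) (hj' : j < v.length) (he : u[i] = u[j]) : v[i] = v[j] := by
  have h1 : List.idxOf v[i] v = List.idxOf v[j] v := by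
    rw [← h i hi hi', ← h j hj hj', he]
  have hlt1 : List.idxOf v[i] v < v.length := List.idxOf_lt_length_iff.mpr (List.getElem_mem _)
  have hlt2 : List.idxOf v[j] v < v.length := List.idxOf_lt_length_iff.mpr (List.getElem_mem _)
  have e1 : v[List.idxOf v[i] v] = v[i] := List.getElem_idxOf hlt1
  have e2 : v[List.idxOf v[j] v] = v[j] := List.getElem_idxOf hlt2
  rw [← e1, ← e2]
  simp only [h1]

theorem zip_pair_mem (s1 s2 : List Char) (hlen : s1.length = s2.length)
    (i : Nat) (hi : i < s1.length) : (s1[i], s2[i]'(hlen ▸ hi)) ∈ s1.zip s2 := by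
  rw [List.mem_iff_getElem]
  exact ⟨i, by simp [List.length_zip, hlen ▸ hi, hi], by rw [List.getElem_zip]⟩

theorem fingerprint_iff (s1 s2 : List Char) (hlen : s1.length = s2.length) :
    (s1.map (fun c => ((List.idxOf c s1 : Nat) : Int))
      = s2.map (fun c => ((List.idxOf c s2 : Nat) : Int))) ↔ Iso (s1.zip s2) := by
  have key : (s1.map (fun c => ((List.idxOf c s1 : Nat) : Int))
      = s2.map (fun c => ((List.idxOf c s2 : Nat) : Int))) ↔
      ∀ i (h1 : i < s1.length) (h2 : i < s2.length), List.idxOf s1[i] s1 = List.idxOf s2[i] s2 := by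
    constructor
    · intro h i h1 h2
      have := List.getElem_of_eq h (i := i) (by simpa using h1)
      simp only [List.getElem_map] at this
      exact_mod_cast this
    · intro h
      apply List.ext_getElem (by simp [hlen])
      intro i h1 h2
      simp only [List.getElem_map]
      exact_mod_cast h i (by simpa using h1) (by simpa using h2)
  rw [key]
  constructor
  · intro h p hp q hq
    obtain ⟨i, hiz, hpi⟩ := List.mem_iff_getElem.mp hp
    obtain ⟨j, hjz, hqj⟩ := List.mem_iff_getElem.mp hq
    have hi1 : i < s1.length := lt_of_lt_of_le hiz (by simp [List.length_zip, hlen])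
    have hj1 : j < s1.length := lt_of_lt_of_le hjz (by simp [List.length_zip, hlen])
    have hi2 : i < s2.length := hlen ▸ hi1
    have hj2 : j < s2.length := hlen ▸ hj1
    rw [List.getElem_zip] at hpi hqj
    subst hpi; subst hqj
    constructor
    · intro he
      exact half_transfer s1 s2 h i j hi1 hj1 hi2 hj2 he
    · intro he
      exact half_transfer s2 s1 (fun k hk1 hk2 => (h k hk2 hk1).symm) i j hi2 hj2 hi1 hj1 he
  · intro h i h1 h2
    have hpair : ∀ k l (hk : k < s1.length) (hl : l < s1.length),
        (s1[k] = s1[l] ↔ s2[k]'(hlen ▸ hk) = s2[l]'(hlen ▸ hl)) := by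
      intro k l hk hl
      have := h _ (zip_pair_mem s1 s2 hlen k hk) _ (zip_pair_mem s1 s2 hlen l hl)
      simpa using this
    have hk1 : List.idxOf s1[i] s1 < s1.length := List.idxOf_lt_length_iff.mpr (List.getElem_mem _)
    have hk2 : List.idxOf s2[i] s2 < s2.length := List.idxOf_lt_length_iff.mpr (List.getElem_mem _)
    have e1 : s1[List.idxOf s1[i] s1] = s1[i] := List.getElem_idxOf hk1
    have e2 : s2[List.idxOf s2[i] s2] = s2[i] := List.getElem_idxOf hk2
    -- k2 ≤ k1
    have t1 : s2[List.idxOf s1[i] s1]'(hlen ▸ hk1) = s2[i]'h2 :=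
      (hpair _ i hk1 h1).mp e1
    have le1 : List.idxOf s2[i] s2 ≤ List.idxOf s1[i] s1 := by
      have := idxOf_le_of_getElem s2 (List.idxOf s1[i] s1) (hlen ▸ hk1)
      rwa [t1] at this
    -- k1 ≤ k2
    have t2 : s1[List.idxOf s2[i] s2]'(hlen ▸ hk2) = s1[i]'h1 :=
      (hpair _ i (hlen ▸ hk2) h1).mpr e2
    have le2 : List.idxOf s1[i] s1 ≤ List.idxOf s2[i] s2 := by
      have := idxOf_le_of_getElem s1 (List.idxOf s2[i] s2) (hlen ▸ hk2)
      rwa [t2] at this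
    omega

theorem compair_eq_norm (w t : List Char) (h : w.length = t.length) :
    (compair w t = true) ↔ (normB w = normB t) := by
  rw [norm_eq, norm_eq, fingerprint_iff w t h]
  exact compair_iff_iso w t

-- ===== VERDICT (by name: the statement is the Claim_ definition above) =====
theorem window_length (s : List Char) (i m : Int) (h0 : 0 ≤ i) (hm : 0 ≤ m)
    (hle : i + m ≤ (s.length : Int)) :
    (PySem.List.slice s (some i) (some (i + m))).length = m.toNat := by
  rw [PySem.List.slice_toNat s h0 (by omega : (0:Int) ≤ i + m)]
  simp only [List.length_take, List.length_drop]
  omega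

theorem solve_spec : Claim_equal_solve := by
  intro S T _
  unfold Spec_solve
  simp only [solve, solve_alt]
  apply PySem.List.foldl_congr_mem
  intro acc i hi
  obtain ⟨h0, hlt⟩ := PySem.List.mem_pyRange_one.mp hi
  have hw : (PySem.List.slice S.toList (some i) (some (i + (T.toList.length : Int)))).length
      = T.toList.length := by
    rw [window_length S.toList i (T.toList.length : Int) h0 (by positivity) (by omega)]
    omega
  have hiff := compair_eq_norm _ T.toList hw
  by_cases hc : normB (PySem.List.slice S.toList (some i) (some (i + (T.toList.length : Int)))) = normB T.toList
  · rw [if_pos (hiff.mpr hc), if_pos hc]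
  · have hb : ¬ (compair (PySem.List.slice S.toList (some i) (some (i + (T.toList.length : Int)))) T.toList = true) :=
      fun h => hc (hiff.mp h)
    rw [if_neg hb, if_neg hc]
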